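-- pv_equiv track=rewrite | github.com/EdsonEddy/scsc | notebooks/datasets/medium/778953.py | representar_en_base_fibonacci
-- ===== SOURCE A (Python) =====
-- def generar_fibonacci(h):
--     fib = [1, 2]
--     while fib[-1] + fib[-2] <= h:
--         fib.append(fib[-1] + fib[-2])
--     return fib
--
-- def representar_en_base_fibonacci(n):
--     fib = generar_fibonacci(n)
--     v = []
--     for num in reversed(fib):
--         if num <= n:
--             v.append('1')
--             n -= num
--         else:
--             if v:
--                 v.append('0')
--     return ''.join(v)
-- ===== SOURCE B (Python) =====
-- def representar_en_base_fibonacci(n):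
--     # Recursive decomposition: peel off the largest Fibonacci number a = F_k <= n,
--     # emit its '1', and zero-pad the recursively computed representation of the
--     # remainder out to width k (the k lower positions). n <= 0 has the empty
--     # representation, which also makes the padding supply every '0' digit.
--     if n <= 0:
--         return ''
--     a, b, k = 1, 2, 0
--     while b <= n:
--         a, b, k = b, a + b, k + 1
--     return '1' + representar_en_base_fibonacci(n - a).zfill(k)
-- ===== Notes on version B (the rewrite author's own statement) =====
-- stated objective: alternative
-- what changed: B is a recursive decomposition: it peels off only the largest Fibonacci number per call and rebuilds the string by zero-padding (zfill) the remainder's representation to the digit position, instead of A's materialised Fibonacci list and single reversed loop that emits a bit per Fibonacci number with conditional leading-zero suppression.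
import Mathlib
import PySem

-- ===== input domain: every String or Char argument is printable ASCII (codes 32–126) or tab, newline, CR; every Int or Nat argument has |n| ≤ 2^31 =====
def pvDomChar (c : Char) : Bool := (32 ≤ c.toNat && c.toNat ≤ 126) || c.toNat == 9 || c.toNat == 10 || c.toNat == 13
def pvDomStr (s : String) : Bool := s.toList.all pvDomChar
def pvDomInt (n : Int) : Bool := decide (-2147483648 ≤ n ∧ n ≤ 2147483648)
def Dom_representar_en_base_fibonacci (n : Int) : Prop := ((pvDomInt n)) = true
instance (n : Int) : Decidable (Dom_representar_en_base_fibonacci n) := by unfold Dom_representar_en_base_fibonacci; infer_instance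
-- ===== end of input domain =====

-- B replaces A's materialised Fibonacci list + one reversed loop (with conditional
-- leading-zero suppression) by a recursive decomposition: peel off the largest
-- Fibonacci number, emit '1', and zero-pad (zfill) the remainder's representation.
-- The `fuel` arguments are a totality device only: each Python loop/recursion runs
-- at most ~46 times for |n| ≤ 2^31 (Fibonacci growth), far below the fuel given.

-- ===== PORT A =====
-- generar_fibonacci's while loop (a = fib[-2], b = fib[-1])
def genFibAux (fuel : Nat) (h a b : Int) (acc : List Int) : List Int :=
  match fuel with
  | 0 => acc
  | f + 1 => if a + b ≤ h then genFibAux f h b (a + b) (acc ++ [a + b]) else acc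

-- the for-loop over reversed(fib); v holds the one-char strings '1'/'0' as Chars,
-- so ''.join(v) is String.ofList
def loopA : List Int → Int → List Char → List Char
  | [], _, v => v
  | num :: rest, n, v =>
    if num ≤ n then loopA rest (n - num) (v ++ ['1'])
    else loopA rest n (if v.isEmpty then v else v ++ ['0'])

def representar_en_base_fibonacci (n : Int) : String :=
  String.ofList (loopA (genFibAux 64 n 1 2 [1, 2]).reverse n [])

-- ===== PORT B =====
-- str.zfill(k) on a '0'/'1' string: pad with '0' on the left to width k (exact here:
-- no sign character can occur)
def zfillL (l : List Char) (k : Nat) : List Char := List.replicate (k - l.length) '0' ++ l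

-- Source B's while loop: climb (a, b, k) to the largest Fibonacci a = F_k ≤ n
def climbB : Nat → Int → Int → Int → Nat → Int × Int × Nat
  | 0, _, a, b, k => (a, b, k)
  | f + 1, m, a, b, k => if b ≤ m then climbB f m b (a + b) (k + 1) else (a, b, k)

-- the recursive body of Source B ('' for n ≤ 0; else '1' + rep(n - a).zfill(k))
def repB : Nat → Int → List Char
  | 0, _ => []
  | f + 1, m =>
    if m ≤ 0 then []
    else
      let t := climbB 64 m 1 2 0
      '1' :: zfillL (repB f (m - t.1)) t.2.2

def representar_en_base_fibonacci_alt (n : Int) : String := String.ofList (repB 64 n)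

-- ===== PRECONDITION & SPEC =====
def Spec_representar_en_base_fibonacci (n : Int) (out : String) : Prop := out = representar_en_base_fibonacci_alt n
instance (n : Int) (out : String) : Decidable (Spec_representar_en_base_fibonacci n out) := by unfold Spec_representar_en_base_fibonacci; infer_instance

-- ===== CLAIM (what is proved, stated in full; the proofs are below) =====
def Claim_equal_representar_en_base_fibonacci : Prop := ∀ (n : Int), Dom_representar_en_base_fibonacci n → Spec_representar_en_base_fibonacci n (representar_en_base_fibonacci n)

-- ===== LEMMAS AND PROOFS =====

-- the Fibonacci sequence both programs walk: 1, 2, 3, 5, …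
def F : Nat → Int
  | 0 => 1
  | 1 => 2
  | k + 2 => F k + F (k + 1)

-- [F k, F (k-1), …, F 0]
def fibDown : Nat → List Int
  | 0 => [F 0]
  | k + 1 => F (k + 1) :: fibDown k

-- the bit pattern over a list of values, threading the remainder
def bitsF : List Int → Int → List Char
  | [], _ => []
  | x :: xs, r => if x ≤ r then '1' :: bitsF xs (r - x) else '0' :: bitsF xs r

-- linear-time pair form of F, for the one numeric fact below
def fibPair : Nat → Int × Int
  | 0 => (1, 2)
  | k + 1 => match fibPair k with | (a, b) => (b, a + b)

theorem fibPair_eq : ∀ k, fibPair k = (F k, F (k + 1)) := by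
  intro k
  induction k with
  | zero => rfl
  | succ k ih => simp [fibPair, ih, F]

theorem F_pos_lt (k : Nat) : 1 ≤ F k ∧ F k < F (k + 1) := by
  induction k with
  | zero => norm_num [F]
  | succ k ih =>
      refine ⟨by omega, ?_⟩
      show F (k + 1) < F k + F (k + 1)
      omega

theorem F_pos (k : Nat) : 1 ≤ F k := (F_pos_lt k).1

theorem F_mono' : ∀ (l k : Nat), k ≤ l → F k ≤ F l := by
  intro l
  induction l with
  | zero =>
      intro k h
      have hk : k = 0 := by omega
      simp [hk]
  | succ l ih =>
      intro k h
      rcases Nat.lt_or_ge k (l + 1) with hlt | hge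
      · exact le_trans (ih k (by omega)) (le_of_lt (F_pos_lt l).2)
      · have hk : k = l + 1 := by omega
        simp [hk]

theorem F_mono {k l : Nat} (h : k ≤ l) : F k ≤ F l := F_mono' l k h

theorem F_2pow31 : (2147483648 : Int) < F 45 := by
  have h := fibPair_eq 45
  have : fibPair 45 = (2971215073, 4807526976) := by decide
  rw [this] at h
  have h1 : F 45 = 2971215073 := by
    have := congrArg Prod.fst h
    simpa using this.symm
  rw [h1]; norm_num

theorem bitsF_length (k : Nat) : ∀ m, (bitsF (fibDown k) m).length = k + 1 := by
  induction k with
  | zero => intro m; by_cases h : F 0 ≤ m <;> simp [fibDown, bitsF, h]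
  | succ k ih =>
      intro m
      by_cases h : F (k + 1) ≤ m <;> simp [fibDown, bitsF, h, ih]

theorem bitsF_nonpos (k : Nat) : ∀ m, m ≤ 0 → bitsF (fibDown k) m = List.replicate (k + 1) '0' := by
  induction k with
  | zero =>
      intro m hm
      have : ¬ F 0 ≤ m := by have := F_pos 0; omega
      simp [fibDown, bitsF, this]
  | succ k ih =>
      intro m hm
      have : ¬ F (k + 1) ≤ m := by have := F_pos (k + 1); omega
      simp [fibDown, bitsF, this, ih m hm, List.replicate_succ]

theorem dropWhile_replicate_zero (j : Nat) :
    (List.replicate j '0').dropWhile (· == '0') = ([] : List Char) := by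
  induction j with
  | zero => simp
  | succ j ih => simp [List.replicate_succ]

theorem dw_nonpos (k : Nat) (m : Int) (hm : m ≤ 0) :
    (bitsF (fibDown k) m).dropWhile (· == '0') = [] := by
  rw [bitsF_nonpos k m hm]; exact dropWhile_replicate_zero (k + 1)

-- adding a too-large Fibonacci on top only contributes a leading '0'
theorem dw_ext (K : Nat) : ∀ k m, k ≤ K → m < F (k + 1) →
    (bitsF (fibDown K) m).dropWhile (· == '0') =
      (bitsF (fibDown k) m).dropWhile (· == '0') := by
  induction K with
  | zero => intro k m hk _; interval_cases k; rfl
  | succ K ih =>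
      intro k m hk hm
      rcases Nat.lt_or_ge k (K + 1) with hlt | hge
      · have hKm : ¬ F (K + 1) ≤ m := by
          have : F (k + 1) ≤ F (K + 1) := F_mono (by omega)
          omega
        have : bitsF (fibDown (K + 1)) m = '0' :: bitsF (fibDown K) m := by
          simp [fibDown, bitsF, hKm]
        rw [this]
        have h01 : (('0' : Char) == '0') = true := by decide
        simp only [List.dropWhile, h01]
        exact ih k m (by omega) hm
      · have : k = K + 1 := by omega
        simp [this]

theorem dw_ext2 {a b : Nat} {m : Int} (ha : m < F (a + 1)) (hb : m < F (b + 1)) :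
    (bitsF (fibDown a) m).dropWhile (· == '0') =
      (bitsF (fibDown b) m).dropWhile (· == '0') := by
  rcases le_total a b with h | h
  · exact (dw_ext b a m h ha).symm
  · exact dw_ext a b m h hb

theorem zfill_dropWhile (L : List Char) : zfillL (L.dropWhile (· == '0')) L.length = L := by
  have hsplit := List.takeWhile_append_dropWhile (p := (· == '0')) (l := L)
  have htake : L.takeWhile (· == '0') =
      List.replicate (L.takeWhile (· == '0')).length '0' := by
    apply List.eq_replicate_of_mem
    intro b hb
    have := List.mem_takeWhile_imp hb
    simpa [beq_iff_eq] using this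
  have hlen : (L.takeWhile (· == '0')).length + (L.dropWhile (· == '0')).length = L.length := by
    have h2 := congrArg List.length hsplit
    rw [List.length_append] at h2
    exact h2
  unfold zfillL
  have : L.length - (L.dropWhile (· == '0')).length = (L.takeWhile (· == '0')).length := by omega
  rw [this, ← htake, hsplit]

-- B's inner while loop reaches the largest Fibonacci number ≤ m
theorem climbB_spec : ∀ (fuel k : Nat) (m : Int), F k ≤ m → m < F (k + fuel + 1) →
    ∃ t, k ≤ t ∧ climbB fuel m (F k) (F (k + 1)) k = (F t, F (t + 1), t) ∧
      F t ≤ m ∧ m < F (t + 1) := by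
  intro fuel
  induction fuel with
  | zero =>
      intro k m h1 h2
      exact ⟨k, le_refl k, rfl, h1, by simpa using h2⟩
  | succ f ih =>
      intro k m h1 h2
      by_cases hc : F (k + 1) ≤ m
      · have hstep : climbB (f + 1) m (F k) (F (k + 1)) k =
            climbB f m (F (k + 1)) (F (k + 2)) (k + 1) := by
          simp [climbB, hc]; rfl
        obtain ⟨t, ht1, ht2, ht3, ht4⟩ := ih (k + 1) m hc (by
          have : k + 1 + f + 1 = k + (f + 1) + 1 := by omega
          rw [this]; exact h2)
        exact ⟨t, by omega, by rw [hstep]; exact ht2, ht3, ht4⟩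
      · exact ⟨k, le_refl k, by simp [climbB, hc], h1, by omega⟩

theorem repB_nonpos (f : Nat) (m : Int) (hm : m ≤ 0) : repB f m = [] := by
  cases f with
  | zero => rfl
  | succ f => simp [repB, hm]

-- the main B-side lemma: repB computes the leading-zero-stripped bit pattern
theorem repB_spec : ∀ (fuel k : Nat) (m : Int), m < F (k + 1) → k + 1 ≤ 2 * fuel → k ≤ 64 →
    repB fuel m = (bitsF (fibDown k) m).dropWhile (· == '0') := by
  intro fuel
  induction fuel with
  | zero => intro k m _ h _; omega
  | succ f ih =>
      intro k m hm hk hk64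
      by_cases hpos : m ≤ 0
      · rw [repB_nonpos _ _ hpos, dw_nonpos k m hpos]
      · have h1m : F 0 ≤ m := by show (1 : Int) ≤ m; omega
        have hm65 : m < F (0 + 64 + 1) := by
          have h1 : F (k + 1) ≤ F 65 := F_mono (by omega)
          have h2 : F (0 + 64 + 1) = F 65 := rfl
          omega
        obtain ⟨t, ht0, htc, htle, htlt⟩ := climbB_spec 64 0 m h1m hm65
        have htk : t ≤ k := by
          by_contra hgt
          have : F (k + 1) ≤ F t := F_mono (by omega)
          omega
        have hbody : repB (f + 1) m = '1' :: zfillL (repB f (m - F t)) t := by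
          show (if m ≤ 0 then [] else
            let c := climbB 64 m 1 2 0
            '1' :: zfillL (repB f (m - c.1)) c.2.2) = _
          rw [if_neg hpos]
          have h12 : climbB 64 m 1 2 0 = climbB 64 m (F 0) (F 1) 0 := rfl
          simp only [h12, htc]
        rw [hbody, dw_ext k t m htk htlt]
        -- peel the '1' of position t
        cases t with
        | zero =>
            have hF0 : F 0 = 1 := rfl
            have hF1 : F (0 + 1) = 2 := rfl
            have hm1 : m = 1 := by omega
            have hrB : repB f (m - F 0) = [] := repB_nonpos f _ (by omega)
            rw [hrB]
            have hb : bitsF (fibDown 0) m = ['1'] := by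
              simp [bitsF, fibDown, htle]
            rw [hb]
            simp [zfillL, List.dropWhile]
        | succ t' =>
            have hhead : bitsF (fibDown (t' + 1)) m =
                '1' :: bitsF (fibDown t') (m - F (t' + 1)) := by
              simp [fibDown, bitsF, htle]
            rw [hhead]
            have h10 : (('1' : Char) == '0') = false := by decide
            simp only [List.dropWhile, h10]
            congr 1
            -- remainder bound: m - F (t'+1) < F t'
            set m' := m - F (t' + 1) with hm'
            have hrem : m' < F t' := by
              have e1 : F (t' + 1 + 1) = F t' + F (t' + 1) := by
                have : F (t' + 1 + 1) = F (t' + 2) := rfl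
                rw [this]; simp [F]
              omega
            have hLlen : (bitsF (fibDown t') m').length = t' + 1 := bitsF_length t' m'
            have hrep : repB f m' = (bitsF (fibDown t') m').dropWhile (· == '0') := by
              cases t' with
              | zero =>
                  have hm0 : m' ≤ 0 := by
                    have : F 0 = 1 := rfl
                    omega
                  rw [repB_nonpos f m' hm0, dw_nonpos 0 m' hm0]
              | succ t'' =>
                  have h1 : m' < F (t'' + 1) := by
                    have : F (t'' + 1) = F (t'' + 1) := rfl
                    exact hrem
                  rw [ih t'' m' h1 (by omega) (by omega)]
                  refine dw_ext2 h1 ?_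
                  have e : F (t'' + 1 + 1) = F (t'' + 2) := rfl
                  have hle : F (t'' + 1) ≤ F (t'' + 2) := F_mono (by omega)
                  omega
            rw [hrep]
            have := zfill_dropWhile (bitsF (fibDown t') m')
            rw [hLlen] at this
            exact this

-- ===== A-side lemmas (as before) =====
theorem genFibAux_acc (fuel : Nat) : ∀ (h a b : Int) (acc : List Int),
    genFibAux fuel h a b acc = acc ++ genFibAux fuel h a b [] := by
  induction fuel with
  | zero => intro h a b acc; simp [genFibAux]
  | succ f ih =>
      intro h a b acc
      by_cases hc : a + b ≤ h
      · simp only [genFibAux, hc, if_pos, List.nil_append]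
        rw [ih h b (a + b) (acc ++ [a + b]), ih h b (a + b) [a + b]]
        simp
      · simp [genFibAux, hc]

theorem genFibAux_succ (f : Nat) (h a b : Int) (acc : List Int) :
    genFibAux (f + 1) h a b acc =
      if a + b ≤ h then genFibAux f h b (a + b) (acc ++ [a + b]) else acc := rfl

-- A's fib list (above the seeded [1,2]) reversed is an initial fibDown segment
theorem genFib_fibDown (n : Int) : ∀ (fuel k : Nat), n < F (k + fuel + 2) →
    ∃ t, k + 1 ≤ t ∧
      (genFibAux fuel n (F k) (F (k + 1)) []).reverse ++ fibDown (k + 1) = fibDown t ∧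
      n < F (t + 1) := by
  intro fuel
  induction fuel with
  | zero =>
      intro k h2
      exact ⟨k + 1, le_refl _, by simp [genFibAux], by simpa using h2⟩
  | succ f ih =>
      intro k h2
      by_cases hc : F k + F (k + 1) ≤ n
      · have hF2 : F k + F (k + 1) = F (k + 2) := by simp [F]
        have hstep : genFibAux (f + 1) n (F k) (F (k + 1)) [] =
            [F (k + 2)] ++ genFibAux f n (F (k + 1)) (F (k + 2)) [] := by
          rw [genFibAux_succ, if_pos hc, List.nil_append, hF2]
          exact genFibAux_acc f n (F (k + 1)) (F (k + 2)) [F (k + 2)]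
        obtain ⟨t, ht1, ht2, ht3⟩ := ih (k + 1) (by
          have : k + 1 + f + 2 = k + (f + 1) + 2 := by omega
          rw [this]; exact h2)
        refine ⟨t, by omega, ?_, ht3⟩
        rw [hstep]
        have : ([F (k + 2)] ++ genFibAux f n (F (k + 1)) (F (k + 2)) []).reverse =
            (genFibAux f n (F (k + 1)) (F (k + 2)) []).reverse ++ [F (k + 2)] := by simp
        rw [this, List.append_assoc]
        have hfd : ([F (k + 2)] : List Int) ++ fibDown (k + 1) = fibDown (k + 2) := by
          simp [fibDown]
        rw [hfd]
        exact ht2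
      · refine ⟨k + 1, le_refl _, by simp [genFibAux, hc], ?_⟩
        have e1 : F (k + 1 + 1) = F (k + 2) := rfl
        have e2 : F (k + 2) = F k + F (k + 1) := by simp [F]
        omega

theorem loopA_nonempty (l : List Int) : ∀ (r : Int) (v : List Char), v ≠ [] →
    loopA l r v = v ++ bitsF l r := by
  induction l with
  | nil => intro r v _; simp [loopA, bitsF]
  | cons x xs ih =>
      intro r v hv
      by_cases hle : x ≤ r
      · simp only [loopA, bitsF, hle, if_pos]
        rw [ih (r - x) (v ++ ['1']) (by simp)]
        simp
      · simp only [loopA, bitsF, hle, if_neg, not_false_iff]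
        rw [if_neg (by simpa [List.isEmpty_iff] using hv)]
        rw [ih r (v ++ ['0']) (by simp)]
        simp

theorem loopA_nil (l : List Int) : ∀ (r : Int),
    loopA l r [] = (bitsF l r).dropWhile (· == '0') := by
  induction l with
  | nil => intro r; simp [loopA, bitsF]
  | cons x xs ih =>
      intro r
      by_cases hle : x ≤ r
      · simp only [loopA, bitsF, hle, if_pos, List.nil_append]
        rw [loopA_nonempty xs (r - x) ['1'] (by simp)]
        simp [List.dropWhile]
      · simp only [loopA, bitsF, hle, if_neg, not_false_iff, List.isEmpty_nil, if_pos]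
        rw [ih r]
        simp [List.dropWhile]

-- ===== VERDICT (by name: the statement is the Claim_ definition above) =====
theorem representar_en_base_fibonacci_spec : Claim_equal_representar_en_base_fibonacci := by
  intro n hdom
  have hn : n ≤ 2147483648 := by
    have : pvDomInt n = true := hdom
    simpa [pvDomInt] using (of_decide_eq_true this).2
  have h45 : n < F 45 := lt_of_le_of_lt hn F_2pow31
  unfold Spec_representar_en_base_fibonacci representar_en_base_fibonacci representar_en_base_fibonacci_alt
  -- A side
  have hacc := genFibAux_acc 64 n 1 2 [1, 2]
  have h66 : n < F (0 + 64 + 2) := by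
    have e : F (0 + 64 + 2) = F 66 := rfl
    have hle : F 45 ≤ F 66 := F_mono (by omega)
    omega
  obtain ⟨t, ht1, ht2, ht3⟩ := genFib_fibDown n 64 0 h66
  have hAlist : (genFibAux 64 n 1 2 [1, 2]).reverse = fibDown t := by
    rw [hacc]
    have h12 : genFibAux 64 n 1 2 [] = genFibAux 64 n (F 0) (F 1) [] := rfl
    have : ([1, 2] ++ genFibAux 64 n (F 0) (F 1) []).reverse =
        (genFibAux 64 n (F 0) (F 1) []).reverse ++ [2, 1] := by simp
    rw [h12, this]
    have hfd1 : ([2, 1] : List Int) = fibDown 1 := rfl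
    rw [hfd1]
    exact ht2
  rw [hAlist, loopA_nil]
  -- B side
  have hB := repB_spec 64 45 n (by
      have e : F (45 + 1) = F 46 := rfl
      have hle : F 45 ≤ F 46 := F_mono (by omega)
      omega) (by omega) (by omega)
  rw [hB]
  -- both are the canonical stripped pattern
  exact congrArg String.ofList (dw_ext2 ht3 (by
    have e : F (45 + 1) = F 46 := rfl
    have hle : F 45 ≤ F 46 := F_mono (by omega)
    omega))
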